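-- pv_equiv track=rewrite | github.com/NewMountain/algo_practice | chapter_8/8_2.py | direct_robot
-- ===== SOURCE A (Python) =====
-- def direct_robot(board, row, col, paths):
--     """Return the paths the robot can take."""
--     max_row = len(board)
--     max_col = len(board[0])
--
--     within_rows = 0 <= row <= max_row - 1
--     within_cols = 0 <= col <= max_col - 1
--
--     inside = within_cols and within_rows
--
--     if not inside:
--         return [[]]
--
--         # Wall detection
--     if board[row][col] == 1:
--         return [[]]
--
--     point = (row, col)
--
--     paths = [path + [point] for path in paths]
--
--     if row == max_row - 1 and col == max_col - 1:
--         return paths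
--
--     result = direct_robot(board, row + 1, col, paths) + direct_robot(
--         board, row, col + 1, paths
--     )
--
--     # Filter nulls
--     return [r for r in result if r]
-- ===== SOURCE B (Python) =====
-- def _routes(board, r, c, max_row, max_col):
--     """All down/right routes from (r, c) to the bottom-right corner, down-branch first."""
--     if not (0 <= r < max_row and 0 <= c < max_col):
--         return []
--     if board[r][c] == 1:
--         return []
--     pt = (r, c)
--     if r == max_row - 1 and c == max_col - 1:
--         return [[pt]]
--     children = _routes(board, r + 1, c, max_row, max_col) + _routes(board, r, c + 1, max_row, max_col)
--     return [[pt] + rt for rt in children]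
--
--
-- def direct_robot(board, row, col, paths):
--     """Return the paths the robot can take."""
--     max_row = len(board)
--     max_col = len(board[0])
--     if not (0 <= row < max_row and 0 <= col < max_col):
--         return [[]]
--     if board[row][col] == 1:
--         return [[]]
--     routes = _routes(board, row, col, max_row, max_col)
--     return [p + rt for rt in routes for p in paths]
-- ===== Notes on version B (the rewrite author's own statement) =====
-- stated objective: alternative
-- what changed: B separates concerns: a recursive helper enumerates the routes from (row, col) to the goal (down-branch first), and a single comprehension then appends each route to each input path, instead of A's threading the whole growing paths list through every recursive call and re-filtering empties at each level.
-- outside the precondition, e.g. on direct_robot([[0, 1], [1]], 0, 0, [[]]): A returns [], B returns []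
import Mathlib
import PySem

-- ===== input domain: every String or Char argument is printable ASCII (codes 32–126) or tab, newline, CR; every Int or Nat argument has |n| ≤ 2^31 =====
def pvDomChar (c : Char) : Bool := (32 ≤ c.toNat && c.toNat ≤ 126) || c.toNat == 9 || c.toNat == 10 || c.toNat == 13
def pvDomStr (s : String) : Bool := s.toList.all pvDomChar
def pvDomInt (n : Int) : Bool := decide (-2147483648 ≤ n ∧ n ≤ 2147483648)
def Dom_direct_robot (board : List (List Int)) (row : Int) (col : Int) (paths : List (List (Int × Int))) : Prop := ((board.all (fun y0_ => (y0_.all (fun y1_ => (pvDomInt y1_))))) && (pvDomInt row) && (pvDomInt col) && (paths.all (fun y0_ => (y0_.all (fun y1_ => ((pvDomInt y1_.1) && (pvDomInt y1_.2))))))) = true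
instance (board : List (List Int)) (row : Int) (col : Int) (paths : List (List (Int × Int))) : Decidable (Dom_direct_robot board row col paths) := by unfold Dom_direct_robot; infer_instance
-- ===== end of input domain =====

-- B separates route enumeration from path extension: one recursive pass lists the routes,
-- then a single comprehension prefixes each input path (alternative decomposition).

-- board[r][c]; exact inside Pre_ whenever 0 ≤ r < len(board), 0 ≤ c < len(board[0])
def pvCell (board : List (List Int)) (r c : Int) : Int :=
  (PySem.List.pyGet? ((PySem.List.pyGet? board r).getD []) c).getD 0

-- ===== PORT A =====
def direct_robot (board : List (List Int)) (row : Int) (col : Int) (paths : List (List (Int × Int))) : List (List (Int × Int)) :=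
  if ¬ ((0 ≤ col ∧ col ≤ ((board.headD []).length : Int) - 1) ∧
        (0 ≤ row ∧ row ≤ (board.length : Int) - 1)) then [[]]
  else if pvCell board row col = 1 then [[]]
  else if row = (board.length : Int) - 1 ∧ col = ((board.headD []).length : Int) - 1 then
    paths.map (fun p => p ++ [(row, col)])
  else
    (direct_robot board (row + 1) col (paths.map (fun p => p ++ [(row, col)])) ++
      direct_robot board row (col + 1) (paths.map (fun p => p ++ [(row, col)]))).filter
      (fun r => !r.isEmpty)
termination_by (((board.length : Int) - row).toNat + (((board.headD []).length : Int) - col).toNat)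
decreasing_by all_goals omega

-- ===== PORT B =====
def pvRoutes (board : List (List Int)) (r : Int) (c : Int) : List (List (Int × Int)) :=
  if ¬ (0 ≤ r ∧ r < (board.length : Int) ∧ 0 ≤ c ∧ c < ((board.headD []).length : Int)) then []
  else if pvCell board r c = 1 then []
  else if r = (board.length : Int) - 1 ∧ c = ((board.headD []).length : Int) - 1 then [[(r, c)]]
  else
    (pvRoutes board (r + 1) c ++ pvRoutes board r (c + 1)).map (fun rt => (r, c) :: rt)
termination_by (((board.length : Int) - r).toNat + (((board.headD []).length : Int) - c).toNat)
decreasing_by all_goals omega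

def direct_robot_alt (board : List (List Int)) (row : Int) (col : Int) (paths : List (List (Int × Int))) : List (List (Int × Int)) :=
  if ¬ (0 ≤ row ∧ row < (board.length : Int) ∧ 0 ≤ col ∧ col < ((board.headD []).length : Int)) then [[]]
  else if pvCell board row col = 1 then [[]]
  else (pvRoutes board row col).flatMap (fun rt => paths.map (fun p => p ++ rt))

-- ===== PRECONDITION & SPEC =====
-- Pre_ excludes the empty board (A raises IndexError on len(board[0])) and, when the start is
-- in bounds, boards with a row shorter than row 0 (A can raise IndexError on board[row][col]
-- mid-recursion); this slightly narrows: a ragged board whose short cells are walled off or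
-- unreachable still returns in A.
def Pre_direct_robot (board : List (List Int)) (row : Int) (col : Int) (paths : List (List (Int × Int))) : Prop :=
  board ≠ [] ∧
    ((∀ rw ∈ board, (board.headD []).length ≤ rw.length) ∨
      ¬ (0 ≤ row ∧ row < (board.length : Int) ∧ 0 ≤ col ∧ col < ((board.headD []).length : Int)))
instance (board : List (List Int)) (row : Int) (col : Int) (paths : List (List (Int × Int))) : Decidable (Pre_direct_robot board row col paths) := by unfold Pre_direct_robot; infer_instance

def pvWitness_direct_robot : List (List Int) × Int × Int × (List (List (Int × Int))) :=
  ([[0, 0], [0, 0]], 0, 0, [[]])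

def Spec_direct_robot (board : List (List Int)) (row : Int) (col : Int) (paths : List (List (Int × Int))) (out : List (List (Int × Int))) : Prop := out = direct_robot_alt board row col paths
instance (board : List (List Int)) (row : Int) (col : Int) (paths : List (List (Int × Int))) (out : List (List (Int × Int))) : Decidable (Spec_direct_robot board row col paths out) := by unfold Spec_direct_robot; infer_instance

-- ===== CLAIM (what is proved, stated in full; the proofs are below) =====
def Claim_equal_direct_robot : Prop := ∀ (board : List (List Int)) (row : Int) (col : Int) (paths : List (List (Int × Int))), Dom_direct_robot board row col paths → Pre_direct_robot board row col paths → Spec_direct_robot board row col paths (direct_robot board row col paths)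

-- ===== LEMMAS AND PROOFS =====

-- A's result, filtered of empty entries, is exactly B's route/prefix product.
lemma filter_direct_robot_eq (board : List (List Int)) (row col : Int)
    (paths : List (List (Int × Int))) :
    (direct_robot board row col paths).filter (fun r => !r.isEmpty) =
      (pvRoutes board row col).flatMap (fun rt => paths.map (fun p => p ++ rt)) := by
  fun_induction direct_robot board row col paths with
  | case1 row col paths h =>
      rw [pvRoutes, if_pos (show ¬ (0 ≤ row ∧ row < (board.length : Int) ∧ 0 ≤ col ∧
        col < ((board.headD []).length : Int)) by omega)]
      simp
  | case2 row col paths h hw =>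
      rw [pvRoutes, if_neg (show ¬¬ (0 ≤ row ∧ row < (board.length : Int) ∧ 0 ≤ col ∧
        col < ((board.headD []).length : Int)) by omega), if_pos hw]
      simp
  | case3 row col paths h hw hgoal =>
      rw [pvRoutes, if_neg (show ¬¬ (0 ≤ row ∧ row < (board.length : Int) ∧ 0 ≤ col ∧
        col < ((board.headD []).length : Int)) by omega), if_neg hw, if_pos hgoal]
      simp [List.filter_eq_self]
  | case4 row col paths h hw hgoal ihd ihr =>
      rw [pvRoutes, if_neg (show ¬¬ (0 ≤ row ∧ row < (board.length : Int) ∧ 0 ≤ col ∧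
        col < ((board.headD []).length : Int)) by omega), if_neg hw, if_neg hgoal]
      simp at ihd ihr
      simp only [List.filter_append, ihd, ihr]
      rw [List.filter_eq_self.mpr ?_, List.filter_eq_self.mpr ?_]
      · simp [Function.comp_def, List.flatMap_map, List.append_assoc]
      all_goals
        intro a ha
        simp only [List.mem_flatMap, List.mem_map, Function.comp_def] at ha
        obtain ⟨rt, -, p, -, rfl⟩ := ha
        simp

lemma main_eq (board : List (List Int)) (row col : Int) (paths : List (List (Int × Int))) :
    direct_robot board row col paths = direct_robot_alt board row col paths := by
  by_cases hin : 0 ≤ row ∧ row < (board.length : Int) ∧ 0 ≤ col ∧ col < ((board.headD []).length : Int)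
  · by_cases hw : pvCell board row col = 1
    · rw [direct_robot, if_neg (show ¬¬ ((0 ≤ col ∧ col ≤ ((board.headD []).length : Int) - 1) ∧
          (0 ≤ row ∧ row ≤ (board.length : Int) - 1)) by omega), if_pos hw,
        direct_robot_alt, if_neg (by omega), if_pos hw]
    · have hfix : direct_robot board row col paths =
          (direct_robot board row col paths).filter (fun r => !r.isEmpty) := by
        rw [direct_robot, if_neg (show ¬¬ ((0 ≤ col ∧ col ≤ ((board.headD []).length : Int) - 1) ∧
          (0 ≤ row ∧ row ≤ (board.length : Int) - 1)) by omega), if_neg hw]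
        by_cases hgoal : row = (board.length : Int) - 1 ∧ col = ((board.headD []).length : Int) - 1
        · rw [if_pos hgoal]
          refine (List.filter_eq_self.mpr ?_).symm
          intro a ha
          simp only [List.mem_map] at ha
          obtain ⟨p, -, rfl⟩ := ha
          simp
        · rw [if_neg hgoal, List.filter_filter]
          simp
      rw [hfix, filter_direct_robot_eq,
        direct_robot_alt, if_neg (by omega), if_neg hw]
  · rw [direct_robot, if_pos (show ¬ ((0 ≤ col ∧ col ≤ ((board.headD []).length : Int) - 1) ∧
        (0 ≤ row ∧ row ≤ (board.length : Int) - 1)) by omega),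
      direct_robot_alt, if_pos (by omega)]

-- ===== VERDICT (by name: the statement is the Claim_ definition above) =====
theorem direct_robot_spec : Claim_equal_direct_robot := by
  intro board row col paths _ _
  unfold Spec_direct_robot
  exact main_eq board row col paths
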